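-- pv_equiv track=rewrite | github.com/Vasileios-Pistikopoulos/DataManagement1 | ΑΣΚΗΣΗ 2 - Αλγόριθμοι Αποτίμησης Συνενώσεων/excercise2.py | hash_semijoin
-- ===== SOURCE A (Python) =====
-- def hash_semijoin(r, s):
--     hash_table = {}#δηιουργια dictionary για τα keys του s
--     result = []#array για το αποτελεσμα
--     for t in s:#για καθε tuple του s
--         key = t[0]#παρε κλειδι
--         if key not in hash_table:#αν δεν ειναι βαλτο στο dict
--             hash_table[key] = True
--
--     for t in r:#για καθε tuple του r
--         key = t[0]#παρε κλειδι
--         if key in hash_table:#αν το κλειδι υπαρχει στο table με τα keys του s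
--             result.append(t)#προσθεσε στο αποτελεσμα
--
--     return result
-- ===== SOURCE B (Python) =====
-- def hash_semijoin(r, s):
--     # nested-loop semijoin: rescan s for each tuple of r, no index built
--     return [t for t in r if any(u[0] == t[0] for u in s)]
-- ===== Notes on version B (the rewrite author's own statement) =====
-- stated objective: simpler
-- what changed: Replaced the two-pass hash-table build plus probe with a one-liner nested-loop semijoin that rescans s for each tuple of r, building no dictionary.
import Mathlib
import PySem

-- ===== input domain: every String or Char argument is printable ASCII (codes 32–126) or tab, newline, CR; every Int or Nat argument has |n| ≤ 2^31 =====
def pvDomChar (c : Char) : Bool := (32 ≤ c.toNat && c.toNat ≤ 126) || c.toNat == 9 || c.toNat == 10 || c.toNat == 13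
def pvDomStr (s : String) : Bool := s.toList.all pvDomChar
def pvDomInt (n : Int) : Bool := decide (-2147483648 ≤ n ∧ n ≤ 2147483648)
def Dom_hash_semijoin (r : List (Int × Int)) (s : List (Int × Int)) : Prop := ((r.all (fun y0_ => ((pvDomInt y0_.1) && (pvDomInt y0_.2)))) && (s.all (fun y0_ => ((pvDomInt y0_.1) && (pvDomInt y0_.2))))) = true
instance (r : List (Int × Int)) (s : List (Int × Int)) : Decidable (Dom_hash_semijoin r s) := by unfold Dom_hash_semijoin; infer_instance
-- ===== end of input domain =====

-- B is a one-liner nested-loop semijoin (no hash table built); equivalence of return values is proved.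

-- ===== PORT A =====
def hash_semijoin (r : List (Int × Int)) (s : List (Int × Int)) : List (Int × Int) :=
  -- first loop: build hash_table with keys of s
  let hash_table : PySem.Dict Int Bool :=
    s.foldl (fun h t => if h.contains t.1 = false then h.insert t.1 true else h) PySem.Dict.empty
  -- second loop: keep tuples of r whose key is in hash_table
  r.foldl (fun result t => if hash_table.contains t.1 then result ++ [t] else result) []

-- ===== PORT B =====
def hash_semijoin_alt (r : List (Int × Int)) (s : List (Int × Int)) : List (Int × Int) :=
  match r with
  | [] => []
  | t :: rest =>
    if s.any (fun u => u.1 == t.1) then t :: hash_semijoin_alt rest s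
    else hash_semijoin_alt rest s

-- ===== PRECONDITION & SPEC =====
def Spec_hash_semijoin (r : List (Int × Int)) (s : List (Int × Int)) (out : List (Int × Int)) : Prop := out = hash_semijoin_alt r s
instance (r : List (Int × Int)) (s : List (Int × Int)) (out : List (Int × Int)) : Decidable (Spec_hash_semijoin r s out) := by unfold Spec_hash_semijoin; infer_instance

-- ===== CLAIM (what is proved, stated in full; the proofs are below) =====
def Claim_equal_hash_semijoin : Prop := ∀ (r : List (Int × Int)) (s : List (Int × Int)), Dom_hash_semijoin r s → Spec_hash_semijoin r s (hash_semijoin r s)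

-- ===== LEMMAS AND PROOFS =====

-- membership in the table built by A's first loop = "some tuple of s has this key"
lemma contains_build (s : List (Int × Int)) (d : PySem.Dict Int Bool) (k : Int) :
    (s.foldl (fun h t => if h.contains t.1 = false then h.insert t.1 true else h) d).contains k
      = (d.contains k || s.any (fun u => u.1 == k)) := by
  induction s generalizing d with
  | nil => simp
  | cons u s ih =>
    simp only [List.foldl_cons, List.any_cons, ih]
    by_cases hc : d.contains u.1 = false
    · simp only [hc, if_true]
      by_cases hk : u.1 = k
      · subst hk; simp [hc]
      · simp [PySem.Dict.contains_insert, beq_false_of_ne hk, beq_false_of_ne (Ne.symm hk)]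
    · simp only [hc]
      by_cases hk : u.1 = k
      · subst hk; simp at hc; simp [hc]
      · simp [beq_false_of_ne hk]

-- B's recursion is List.filter
lemma alt_eq_filter (r s : List (Int × Int)) :
    hash_semijoin_alt r s = r.filter (fun t => s.any (fun u => u.1 == t.1)) := by
  induction r with
  | nil => rfl
  | cons t rest ih =>
    by_cases h : s.any (fun u => u.1 == t.1) <;>
      simp [hash_semijoin_alt, ih, h]

-- ===== VERDICT (by name: the statement is the Claim_ definition above) =====
theorem hash_semijoin_spec : Claim_equal_hash_semijoin := by
  intro r s _
  unfold Spec_hash_semijoin hash_semijoin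
  rw [alt_eq_filter]
  simp only [PySem.List.foldl_append_if_eq_filter, List.nil_append]
  apply List.filter_congr
  intro t _
  rw [contains_build, PySem.Dict.contains_empty]
  simp
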